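-- pv_equiv track=rewrite | github.com/fossabot/akari-bot | modules/twenty_four/__init__.py | contains_all_numbers
-- ===== SOURCE A (Python) =====
-- def contains_all_numbers(expr, numbers):
--     used_numbers = [str(num) for num in numbers]
--     i = 0
--     while i < len(expr):
--         char = expr[i]
--         if char.isdigit():
--             number = char
--             while i + 1 < len(expr) and expr[i + 1].isdigit():
--                 number += expr[i + 1]
--                 i += 1
--             if number in used_numbers:
--                 used_numbers.remove(number)
--         i += 1
--
--     return len(used_numbers) == 0
-- ===== SOURCE B (Python) =====
-- def contains_all_numbers(expr, numbers):
--     # Two-pass: collect all maximal digit runs once, then compare counts.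
--     runs = []
--     cur = ""
--     for ch in expr:
--         if ch.isdigit():
--             cur += ch
--         else:
--             if cur:
--                 runs.append(cur)
--             cur = ""
--     if cur:
--         runs.append(cur)
--     targets = [str(n) for n in numbers]
--     return all(runs.count(t) >= targets.count(t) for t in targets)
-- ===== Notes on version B (the rewrite author's own statement) =====
-- stated objective: simpler
-- what changed: B collects all maximal digit runs in one pass and then compares per-value counts (runs.count(t) >= targets.count(t)), replacing A's index-based scan with in-place removal from the remaining-numbers list.
import Mathlib
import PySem

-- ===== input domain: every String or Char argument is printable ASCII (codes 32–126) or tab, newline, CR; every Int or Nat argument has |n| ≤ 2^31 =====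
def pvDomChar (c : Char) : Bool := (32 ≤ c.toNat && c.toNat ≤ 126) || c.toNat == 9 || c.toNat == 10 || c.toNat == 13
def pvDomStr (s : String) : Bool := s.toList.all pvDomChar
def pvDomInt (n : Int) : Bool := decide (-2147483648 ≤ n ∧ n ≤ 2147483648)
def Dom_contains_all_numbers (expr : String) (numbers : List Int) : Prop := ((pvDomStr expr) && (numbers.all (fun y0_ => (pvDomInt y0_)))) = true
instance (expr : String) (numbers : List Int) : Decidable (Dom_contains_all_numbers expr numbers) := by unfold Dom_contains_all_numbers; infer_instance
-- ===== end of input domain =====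

-- B replaces A's index scan with in-place removal by a build-the-runs-then-compare-counts
-- two-pass structure (objective: simpler). Python strings are represented as List Char inside
-- the helpers (built char by char, as the Pythons do); PySem.Chars.isdigit is char.isdigit().

-- ===== PORT A =====
-- inner while: consume following digit chars into `number`
def pvAInner : List Char → List Char → (List Char × List Char)
  | [], number => (number, [])
  | c :: rest, number =>
      if PySem.Chars.isdigit c then pvAInner rest (number ++ [c]) else (number, c :: rest)

-- 'if number in used_numbers: used_numbers.remove(number)'
def pvAStep (used : List (List Char)) (number : List Char) : List (List Char) :=
  if used.contains number then (PySem.List.remove? used number).getD used else used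

-- outer while, fuel-bounded (fuel = remaining length; only a totality guard, never reached:
-- the scan position advances by at least one character per iteration)
def pvALoop : Nat → List Char → List (List Char) → List (List Char)
  | 0, _, used => used
  | _ + 1, [], used => used
  | fuel + 1, c :: rest, used =>
      if PySem.Chars.isdigit c then
        let p := pvAInner rest [c]
        pvALoop fuel p.2 (pvAStep used p.1)
      else pvALoop fuel rest used

def contains_all_numbers (expr : String) (numbers : List Int) : Bool :=
  let used := numbers.map (fun n => (PySem.Int.toStr n).toList)
  (pvALoop expr.toList.length expr.toList used).length == 0

-- ===== PORT B =====
-- one pass collecting every maximal digit run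
def pvBRuns : List Char → List Char → List (List Char) → List (List Char)
  | [], cur, runs => if cur = [] then runs else runs ++ [cur]
  | c :: rest, cur, runs =>
      if PySem.Chars.isdigit c then pvBRuns rest (cur ++ [c]) runs
      else pvBRuns rest [] (if cur = [] then runs else runs ++ [cur])

def contains_all_numbers_alt (expr : String) (numbers : List Int) : Bool :=
  let runs := pvBRuns expr.toList [] []
  let targets := numbers.map (fun n => (PySem.Int.toStr n).toList)
  targets.all (fun t => decide (PySem.List.count runs t ≥ PySem.List.count targets t))

-- ===== PRECONDITION & SPEC =====
def Spec_contains_all_numbers (expr : String) (numbers : List Int) (out : Bool) : Prop := out = contains_all_numbers_alt expr numbers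
instance (expr : String) (numbers : List Int) (out : Bool) : Decidable (Spec_contains_all_numbers expr numbers out) := by unfold Spec_contains_all_numbers; infer_instance

-- ===== CLAIM (what is proved, stated in full; the proofs are below) =====
def Claim_equal_contains_all_numbers : Prop := ∀ (expr : String) (numbers : List Int), Dom_contains_all_numbers expr numbers → Spec_contains_all_numbers expr numbers (contains_all_numbers expr numbers)

-- ===== LEMMAS AND PROOFS =====

theorem pvAInner_eq (cs : List Char) : ∀ num,
    pvAInner cs num = (num ++ cs.takeWhile PySem.Chars.isdigit, cs.dropWhile PySem.Chars.isdigit) := by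
  induction cs with
  | nil => intro num; simp [pvAInner]
  | cons c rest ih =>
      intro num
      simp only [pvAInner, List.takeWhile, List.dropWhile]
      by_cases h : PySem.Chars.isdigit c
      · simp [h, ih]
      · simp [h]

theorem pvBRuns_acc (cs : List Char) : ∀ cur runs,
    pvBRuns cs cur runs = runs ++ pvBRuns cs cur [] := by
  induction cs with
  | nil => intro cur runs; simp only [pvBRuns]; split <;> simp
  | cons c rest ih =>
      intro cur runs
      simp only [pvBRuns]
      by_cases h : PySem.Chars.isdigit c
      · rw [if_pos h, if_pos h]
        exact ih _ _
      · rw [if_neg h, if_neg h]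
        rw [ih [] (if cur = [] then runs else runs ++ [cur]),
            ih [] (if cur = [] then [] else [] ++ [cur])]
        split_ifs <;> simp

theorem pvBRuns_digit_run (cs : List Char) : ∀ cur, cur ≠ [] →
    pvBRuns cs cur [] =
      (cur ++ cs.takeWhile PySem.Chars.isdigit) :: pvBRuns (cs.dropWhile PySem.Chars.isdigit) [] [] := by
  induction cs with
  | nil =>
      intro cur hcur
      simp [pvBRuns, hcur]
  | cons c rest ih =>
      intro cur hcur
      by_cases h : PySem.Chars.isdigit c
      · rw [List.takeWhile_cons_of_pos h, List.dropWhile_cons_of_pos h]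
        have hl : pvBRuns (c :: rest) cur [] = pvBRuns rest (cur ++ [c]) [] := by
          simp only [pvBRuns]; rw [if_pos h]
        rw [hl, ih (cur ++ [c]) (by simp)]
        simp
      · rw [List.takeWhile_cons_of_neg h, List.dropWhile_cons_of_neg h]
        have hl : pvBRuns (c :: rest) cur [] = pvBRuns rest [] [cur] := by
          simp only [pvBRuns]; rw [if_neg h, if_neg hcur]; simp
        have hr : pvBRuns (c :: rest) [] [] = pvBRuns rest [] [] := by
          simp only [pvBRuns]; rw [if_neg h]; simp
        rw [hl, hr, pvBRuns_acc rest [] [cur]]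
        simp

theorem pvALoop_eq_foldl : ∀ (n : Nat) (cs : List Char), cs.length ≤ n → ∀ used,
    pvALoop n cs used = (pvBRuns cs [] []).foldl pvAStep used := by
  intro n
  induction n with
  | zero =>
      intro cs hcs used
      have : cs = [] := List.eq_nil_of_length_eq_zero (Nat.le_zero.mp hcs)
      subst this
      simp [pvALoop, pvBRuns]
  | succ n ih =>
      intro cs hcs used
      match cs with
      | [] => simp [pvALoop, pvBRuns]
      | c :: rest =>
          simp only [pvALoop]
          by_cases h : PySem.Chars.isdigit c
          · simp only [h]
            rw [pvAInner_eq rest [c]]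
            have hrec : pvALoop n (rest.dropWhile PySem.Chars.isdigit) (pvAStep used ([c] ++ rest.takeWhile PySem.Chars.isdigit))
                = (pvBRuns (rest.dropWhile PySem.Chars.isdigit) [] []).foldl pvAStep (pvAStep used ([c] ++ rest.takeWhile PySem.Chars.isdigit)) := by
              apply ih
              have h1 : (rest.dropWhile PySem.Chars.isdigit).length ≤ rest.length := List.length_dropWhile_le _ _
              have h2 : rest.length ≤ n := by simpa using Nat.succ_le_succ_iff.mp hcs
              omega
            have hb : pvBRuns (c :: rest) [] [] =
                ([c] ++ rest.takeWhile PySem.Chars.isdigit) :: pvBRuns (rest.dropWhile PySem.Chars.isdigit) [] [] := by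
              have h0 : pvBRuns (c :: rest) [] [] = pvBRuns rest [c] [] := by
                simp only [pvBRuns]; rw [if_pos h]; simp
              rw [h0, pvBRuns_digit_run rest [c] (by simp)]
            rw [hb, List.foldl_cons, hrec]
            simp
          · simp only [h]
            have hb : pvBRuns (c :: rest) [] [] = pvBRuns rest [] [] := by
              simp only [pvBRuns]; rw [if_neg h]; simp
            rw [hb]
            apply ih
            have : rest.length ≤ n := by simpa using Nat.succ_le_succ_iff.mp hcs
            exact this

theorem count_pvAStep (u : List (List Char)) (r v : List Char) :
    (pvAStep u r).count v = u.count v - (if r = v then 1 else 0) := by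
  unfold pvAStep
  by_cases hmem : r ∈ u
  · rw [if_pos (by simpa using hmem), PySem.List.remove?_eq_some_erase u r hmem]
    simp only [Option.getD_some, List.count_erase, beq_iff_eq]
  · rw [if_neg (by simpa using hmem)]
    by_cases hrv : r = v
    · subst hrv
      simp [List.count_eq_zero_of_not_mem hmem]
    · simp [hrv]

theorem count_foldl_pvAStep : ∀ (runs : List (List Char)) (u : List (List Char)) (v : List Char),
    (runs.foldl pvAStep u).count v = u.count v - runs.count v := by
  intro runs
  induction runs with
  | nil => simp
  | cons r rs ih =>
      intro u v
      rw [List.foldl_cons, ih, count_pvAStep, List.count_cons]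
      by_cases hrv : r = v
      · subst hrv; simp only [beq_self_eq_true, if_true]; omega
      · rw [if_neg hrv, if_neg (by simp [hrv] : ¬((r == v) = true))]; omega

theorem foldl_empty_iff (runs used : List (List Char)) :
    (runs.foldl pvAStep used = []) ↔ (∀ t ∈ used, used.count t ≤ runs.count t) := by
  constructor
  · intro hnil t ht
    have := count_foldl_pvAStep runs used t
    rw [hnil] at this
    simp at this
    omega
  · intro h
    rw [List.eq_nil_iff_forall_not_mem]
    intro v hv
    have hpos : 0 < (runs.foldl pvAStep used).count v := List.count_pos_iff.mpr hv
    rw [count_foldl_pvAStep] at hpos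
    have hvu : v ∈ used := by
      by_contra hvu
      rw [List.count_eq_zero_of_not_mem hvu] at hpos
      omega
    have := h v hvu
    omega

-- ===== VERDICT (by name: the statement is the Claim_ definition above) =====
theorem contains_all_numbers_spec : Claim_equal_contains_all_numbers := by
  intro expr numbers _
  unfold Spec_contains_all_numbers contains_all_numbers contains_all_numbers_alt
  simp only [PySem.List.count_eq]
  rw [pvALoop_eq_foldl expr.toList.length expr.toList (le_refl _)]
  rw [Bool.eq_iff_iff]
  simp only [beq_iff_eq, List.length_eq_zero_iff, List.all_eq_true, decide_eq_true_eq, ge_iff_le]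
  exact foldl_empty_iff _ _
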